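-- pv_equiv track=rewrite | github.com/xy-jxn/Coding-Test | 프로그래머스/1/77884. 약수의 개수와 덧셈/약수의 개수와 덧셈.py | solution
-- ===== SOURCE A (Python) =====
-- def solution(left, right):
--     answer = 0
--     for num in range(left, right + 1) :
--         check = 0
--         for i in range(1, num + 1) :
--             if num % i == 0 :
--                 check += 1
--         if check % 2 == 0 : answer += i
--         else : answer -= i
--     return answer
-- ===== SOURCE B (Python) =====
-- def solution(left, right):
--     if left > right:
--         return 0
--     total = (left + right) * (right - left + 1) // 2
--     sq = 0
--     k = 1
--     while k * k <= right:
--         if k * k >= left: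
--             sq += k * k
--         k += 1
--     return total - 2 * sq
-- ===== Notes on version B (the rewrite author's own statement) =====
-- stated objective: alternative
-- what changed: Replaces A's per-number trial-division divisor-count loop with the Gauss closed form for the range sum minus twice the sum of the perfect squares in [left,right], accumulated by iterating over integer roots k with k*k <= right only.
import Mathlib
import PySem

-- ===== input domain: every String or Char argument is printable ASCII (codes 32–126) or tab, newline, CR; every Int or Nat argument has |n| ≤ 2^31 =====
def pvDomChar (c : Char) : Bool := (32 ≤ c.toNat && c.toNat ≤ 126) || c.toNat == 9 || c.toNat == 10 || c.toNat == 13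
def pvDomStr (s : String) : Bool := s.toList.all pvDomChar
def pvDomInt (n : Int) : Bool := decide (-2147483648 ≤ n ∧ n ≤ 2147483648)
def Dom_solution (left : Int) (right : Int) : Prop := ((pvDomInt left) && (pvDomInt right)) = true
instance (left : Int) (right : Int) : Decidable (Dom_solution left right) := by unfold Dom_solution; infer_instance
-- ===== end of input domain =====

-- B replaces A's per-number trial-division with the Gauss closed form for the range sum minus
-- twice the sum of the perfect squares in [left, right], found by looping over integer roots only (objective: alternative).

-- ===== PORT A =====
-- Literal port of A. The loop state carries (answer, last value of i); the inner range is empty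
-- when num ≤ 0, in which case Python raises NameError on `i` — the `none` branch below is that
-- (unreachable under Pre_solution) case.
def solution (left : Int) (right : Int) : Int :=
  ((PySem.List.pyRange left (right + 1) 1).foldl
    (fun (st : Int × Option Int) num =>
      let inner := (PySem.List.pyRange 1 (num + 1) 1).foldl
        (fun (c : Int × Option Int) i =>
          (if PySem.Int.mod num i = 0 then c.1 + 1 else c.1, some i))
        (0, st.2)
      match inner.2 with
      | none => st
      | some i =>
        (if PySem.Int.mod inner.1 2 = 0 then st.1 + i else st.1 - i, some i))
    (0, (none : Option Int))).1

-- ===== PORT B =====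
-- while k*k <= right: if k*k >= left: sq += k*k; k += 1
def sqLoopB (left : Int) (right : Int) (k : Int) (acc : Int) : Int :=
  if h : k * k ≤ right then
    sqLoopB left right (k + 1) (if left ≤ k * k then acc + k * k else acc)
  else acc
termination_by (right + 1 - k).toNat
decreasing_by
  have hk : k ≤ right := by nlinarith [mul_self_nonneg k, mul_self_nonneg (k - 1)]
  omega

def solution_alt (left : Int) (right : Int) : Int :=
  if left > right then 0
  else PySem.Int.floordiv ((left + right) * (right - left + 1)) 2 - 2 * sqLoopB left right 1 0

-- ===== PRECONDITION & SPEC =====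
-- Pre_ excludes exactly the inputs where A raises NameError (the loop runs and reaches a
-- non-positive num, leaving `i` unbound on the first iteration): left ≤ 0 with a non-empty range.
def Pre_solution (left : Int) (right : Int) : Prop := 1 ≤ left ∨ right < left
instance (left : Int) (right : Int) : Decidable (Pre_solution left right) := by unfold Pre_solution; infer_instance
def pvWitness_solution : Int × Int := (2, 10)

def Spec_solution (left : Int) (right : Int) (out : Int) : Prop := out = solution_alt left right
instance (left : Int) (right : Int) (out : Int) : Decidable (Spec_solution left right out) := by unfold Spec_solution; infer_instance

-- ===== CLAIM (what is proved, stated in full; the proofs are below) =====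
def Claim_equal_solution : Prop := ∀ (left : Int) (right : Int), Dom_solution left right → Pre_solution left right → Spec_solution left right (solution left right)

-- ===== LEMMAS AND PROOFS =====

-- ---- A-side characterisation ----

-- the scalar divisor-count loop (the .1 of A's inner fold)
def dcnt (num : Int) : Int :=
  (PySem.List.pyRange 1 (num + 1) 1).foldl
    (fun c i => if PySem.Int.mod num i = 0 then c + 1 else c) 0

-- per-number contribution of A's outer loop (for num ≥ 1, where i ends as num)
def bodyA (num : Int) : Int := if PySem.Int.mod (dcnt num) 2 = 0 then num else -num

lemma fold_pair_fst (f : Int → Int → Int) :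
    ∀ (l : List Int) (a : Int) (o : Option Int),
      (l.foldl (fun (c : Int × Option Int) i => (f c.1 i, some i)) (a, o)).1 = l.foldl f a := by
  intro l
  induction l with
  | nil => intro a o; rfl
  | cons x t ih => intro a o; simpa using ih (f a x) (some x)

lemma fold_pair_snd (f : Int → Int → Int) (l : List Int) (x : Int) (a : Int) (o : Option Int) :
    ((l ++ [x]).foldl (fun (c : Int × Option Int) i => (f c.1 i, some i)) (a, o)).2 = some x := by
  simp [List.foldl_append]

lemma inner_fold_eq (num : Int) (h : 1 ≤ num) (o : Option Int) :
    (PySem.List.pyRange 1 (num + 1) 1).foldl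
      (fun (c : Int × Option Int) i =>
        (if PySem.Int.mod num i = 0 then c.1 + 1 else c.1, some i)) (0, o)
      = (dcnt num, some num) := by
  have hs : PySem.List.pyRange 1 (num + 1) 1 = PySem.List.pyRange 1 num 1 ++ [num] :=
    PySem.List.pyRange_one_succ_right (by omega)
  refine Prod.ext ?_ ?_
  · exact fold_pair_fst (fun c i => if PySem.Int.mod num i = 0 then c + 1 else c) _ 0 o
  · rw [hs]
    simpa using fold_pair_snd (fun c i => if PySem.Int.mod num i = 0 then c + 1 else c) _ num 0 o

lemma outer_fold_sum :
    ∀ (l : List Int), (∀ x ∈ l, 1 ≤ x) → ∀ (a : Int) (o : Option Int),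
      (l.foldl
        (fun (st : Int × Option Int) num =>
          let inner := (PySem.List.pyRange 1 (num + 1) 1).foldl
            (fun (c : Int × Option Int) i =>
              (if PySem.Int.mod num i = 0 then c.1 + 1 else c.1, some i))
            (0, st.2)
          match inner.2 with
          | none => st
          | some i =>
            (if PySem.Int.mod inner.1 2 = 0 then st.1 + i else st.1 - i, some i))
        (a, o)).1 = a + (l.map bodyA).sum := by
  intro l
  induction l with
  | nil => intro _ a o; simp
  | cons x t ih =>
    intro hmem a o
    have hx : 1 ≤ x := hmem x (by simp)
    have ht : ∀ y ∈ t, 1 ≤ y := fun y hy => hmem y (by simp [hy])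
    simp only [List.foldl_cons, List.map_cons, List.sum_cons]
    rw [inner_fold_eq x hx o]
    by_cases hc : PySem.Int.mod (dcnt x) 2 = 0
    · simp only [hc, if_true, bodyA, if_pos hc]
      rw [ih ht (a + x) (some x)]; ring
    · simp only [hc, if_false, bodyA, if_neg hc]
      rw [ih ht (a - x) (some x)]; ring

lemma sol_sum (left right : Int) (h : 1 ≤ left) :
    solution left right = ((PySem.List.pyRange left (right + 1) 1).map bodyA).sum := by
  unfold solution
  rw [outer_fold_sum _ (fun x hx => by
    have := (PySem.List.mem_pyRange_one).1 hx; omega) 0 none]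
  ring

-- ---- divisor-count parity: odd iff perfect square ----

def divs (n : ℕ) : Finset ℕ := (Finset.Icc 1 n).filter (fun d => d ∣ n)

lemma mem_divs {n d : ℕ} : d ∈ divs n ↔ (1 ≤ d ∧ d ≤ n) ∧ d ∣ n := by
  simp [divs, Finset.mem_filter, Finset.mem_Icc]

lemma divs_parity (n : ℕ) (hn : 1 ≤ n) :
    Odd (divs n).card ↔ ∃ k : ℕ, k * k = n := by
  have hdecomp : (divs n).card
      = ((divs n).filter (fun d => d * d < n)).card
        + ((divs n).filter (fun d => d * d = n)).card
        + ((divs n).filter (fun d => n < d * d)).card := by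
    have h1 := Finset.card_filter_add_card_filter_not (s := divs n) (p := fun d => d * d < n)
    have h2 := Finset.card_filter_add_card_filter_not
      (s := (divs n).filter (fun d => ¬ d * d < n)) (p := fun d => d * d = n)
    rw [Finset.filter_filter, Finset.filter_filter] at h2
    have e1 : (divs n).filter (fun d => ¬ d * d < n ∧ d * d = n)
        = (divs n).filter (fun d => d * d = n) := by
      ext d
      simp only [Finset.mem_filter]
      constructor
      · rintro ⟨h, _, h3⟩; exact ⟨h, h3⟩
      · rintro ⟨h, h3⟩; exact ⟨h, by simp [h3], h3⟩
    have e2 : (divs n).filter (fun d => ¬ d * d < n ∧ ¬ d * d = n)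
        = (divs n).filter (fun d => n < d * d) := by
      ext d
      simp only [Finset.mem_filter]
      constructor
      · rintro ⟨h, h2, h3⟩
        exact ⟨h, lt_of_le_of_ne (le_of_not_gt h2) (fun hh => h3 hh.symm)⟩
      · rintro ⟨h, h2⟩
        exact ⟨h, lt_asymm h2, fun hh => absurd hh (ne_of_gt h2)⟩
    rw [e1, e2] at h2
    omega
  have hLU : ((divs n).filter (fun d => d * d < n)).card
      = ((divs n).filter (fun d => n < d * d)).card := by
    apply Finset.card_bij' (fun d _ => n / d) (fun u _ => n / u)
    · intro d hd
      rw [Finset.mem_filter, mem_divs] at hd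
      obtain ⟨⟨⟨hd1, hdn⟩, hdvd⟩, hlt⟩ := hd
      obtain ⟨e, he⟩ := hdvd
      have hdpos : 0 < d := hd1
      have hde : n / d = e := by rw [he]; exact Nat.mul_div_cancel_left e hdpos
      have hepos : 0 < e := by
        rcases Nat.eq_zero_or_pos e with rfl | h
        · simp at he; omega
        · exact h
      have hdlt : d < e := by
        apply Nat.lt_of_mul_lt_mul_left (a := d)
        rw [← he]; exact hlt
      rw [Finset.mem_filter, mem_divs, hde]
      refine ⟨⟨⟨hepos, ?_⟩, ⟨d, by rw [he]; ring⟩⟩, ?_⟩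
      · exact Nat.le_of_dvd (by omega) ⟨d, by rw [he]; ring⟩
      · calc n = d * e := he
          _ < e * e := by exact Nat.mul_lt_mul_of_lt_of_le hdlt (le_refl e) hepos
    · intro u hu
      rw [Finset.mem_filter, mem_divs] at hu
      obtain ⟨⟨⟨hu1, hun⟩, hudvd⟩, hlt⟩ := hu
      obtain ⟨e, he⟩ := hudvd
      have hupos : 0 < u := hu1
      have hue : n / u = e := by rw [he]; exact Nat.mul_div_cancel_left e hupos
      have hepos : 0 < e := by
        rcases Nat.eq_zero_or_pos e with rfl | h
        · simp at he; omega
        · exact h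
      have helt : e < u := by
        by_contra hc
        push_neg at hc
        have : u * u ≤ u * e := Nat.mul_le_mul_left u hc
        rw [← he] at this; omega
      rw [Finset.mem_filter, mem_divs, hue]
      refine ⟨⟨⟨hepos, ?_⟩, ⟨u, by rw [he]; ring⟩⟩, ?_⟩
      · exact Nat.le_of_dvd (by omega) ⟨u, by rw [he]; ring⟩
      · calc e * e < u * e := Nat.mul_lt_mul_of_lt_of_le helt (le_refl e) hepos
          _ = n := he.symm
    · intro d hd
      rw [Finset.mem_filter, mem_divs] at hd
      exact Nat.div_div_self hd.1.2 (by omega)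
    · intro u hu
      rw [Finset.mem_filter, mem_divs] at hu
      exact Nat.div_div_self hu.1.2 (by omega)
  have hE1 : ((divs n).filter (fun d => d * d = n)).card ≤ 1 := by
    apply Finset.card_le_one.2
    intro a ha b hb
    rw [Finset.mem_filter] at ha hb
    exact Nat.mul_self_inj.1 (ha.2.trans hb.2.symm)
  have hEne : ((divs n).filter (fun d => d * d = n)).Nonempty ↔ ∃ k : ℕ, k * k = n := by
    constructor
    · rintro ⟨d, hd⟩
      rw [Finset.mem_filter] at hd
      exact ⟨d, hd.2⟩
    · rintro ⟨k, hk⟩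
      refine ⟨k, ?_⟩
      rw [Finset.mem_filter, mem_divs]
      have hk1 : 1 ≤ k := by
        rcases Nat.eq_zero_or_pos k with rfl | h
        · simp at hk; omega
        · exact h
      refine ⟨⟨⟨hk1, ?_⟩, ⟨k, hk.symm⟩⟩, hk⟩
      calc k ≤ k * k := Nat.le_mul_of_pos_left k hk1
        _ = n := hk
  rw [Nat.odd_iff]
  constructor
  · intro h
    have hcard : 0 < ((divs n).filter (fun d => d * d = n)).card := by omega
    exact hEne.1 (Finset.card_pos.1 hcard)
  · intro h
    have := (hEne.2 h).card_pos
    omega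

-- the Int divisor-count loop equals the Finset count
lemma cnt_eq (n : ℕ) : ∀ (b : ℕ),
    (PySem.List.pyRange 1 ((b : Int) + 1) 1).foldl
      (fun c i => if PySem.Int.mod (n : Int) i = 0 then c + 1 else c) 0
      = (((Finset.Icc 1 b).filter (fun d => d ∣ n)).card : Int) := by
  intro b
  induction b with
  | zero =>
    rw [show ((0 : ℕ) : Int) + 1 = 1 from by norm_num]
    rw [PySem.List.pyRange_one_eq_nil (by norm_num)]
    simp
  | succ b ih =>
    have hcast : (((b + 1 : ℕ)) : Int) + 1 = ((b : Int) + 1) + 1 := by push_cast; ring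
    rw [hcast, PySem.List.pyRange_one_succ_right (by omega)]
    rw [List.foldl_append]
    simp only [List.foldl_cons, List.foldl_nil]
    rw [ih]
    have hicc : Finset.Icc 1 (b + 1) = insert (b + 1) (Finset.Icc 1 b) := by
      ext d
      simp only [Finset.mem_Icc, Finset.mem_insert]
      omega
    rw [hicc, Finset.filter_insert]
    have hdvd_iff : PySem.Int.mod (n : Int) ((b : Int) + 1) = 0 ↔ (b + 1) ∣ n := by
      rw [PySem.Int.mod_eq_zero_iff_dvd,
        show ((b : Int) + 1) = (((b + 1 : ℕ)) : Int) from by push_cast; ring,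
        Int.natCast_dvd_natCast]
    by_cases hd : (b + 1) ∣ n
    · rw [if_pos (hdvd_iff.2 hd), if_pos hd,
        Finset.card_insert_of_notMem (by simp [Finset.mem_filter])]
      push_cast; ring
    · rw [if_neg (fun h => hd (hdvd_iff.1 h)), if_neg hd]

lemma dcnt_card (num : Int) (h : 1 ≤ num) :
    dcnt num = ((divs num.toNat).card : Int) := by
  obtain ⟨n, rfl⟩ : ∃ n : ℕ, num = (n : Int) := ⟨num.toNat, (Int.toNat_of_nonneg (by omega)).symm⟩
  unfold dcnt divs
  rw [Int.toNat_natCast]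
  exact cnt_eq n n

lemma root_iff (num : Int) (h : 1 ≤ num) :
    (∃ j : Int, 1 ≤ j ∧ j * j = num) ↔ ∃ k : ℕ, k * k = num.toNat := by
  constructor
  · rintro ⟨j, hj1, hjj⟩
    refine ⟨j.toNat, ?_⟩
    have : ((j.toNat : Int)) = j := Int.toNat_of_nonneg (by omega)
    have h2 : ((j.toNat * j.toNat : ℕ) : Int) = num := by push_cast [this]; exact hjj
    omega
  · rintro ⟨k, hk⟩
    refine ⟨(k : Int), ?_, ?_⟩
    · have : k ≠ 0 := by rintro rfl; omega
      exact_mod_cast Nat.one_le_iff_ne_zero.2 this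
    · have : ((k * k : ℕ) : Int) = num := by omega
      push_cast at this; exact this

lemma bodyA_sq (num : Int) (h : 1 ≤ num) (hsq : ∃ j : Int, 1 ≤ j ∧ j * j = num) :
    bodyA num = -num := by
  have hodd : Odd (divs num.toNat).card :=
    (divs_parity num.toNat (by omega)).2 ((root_iff num h).1 hsq)
  have hmod : PySem.Int.mod (dcnt num) 2 ≠ 0 := by
    rw [dcnt_card num h, PySem.Int.mod_eq_emod_of_pos (by norm_num)]
    rcases hodd with ⟨m, hm⟩
    omega
  unfold bodyA
  rw [if_neg hmod]

lemma bodyA_nonsq (num : Int) (h : 1 ≤ num) (hsq : ¬ ∃ j : Int, 1 ≤ j ∧ j * j = num) :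
    bodyA num = num := by
  have heven : ¬ Odd (divs num.toNat).card := by
    intro hodd
    exact hsq ((root_iff num h).2 ((divs_parity num.toNat (by omega)).1 hodd))
  have hmod : PySem.Int.mod (dcnt num) 2 = 0 := by
    rw [dcnt_card num h, PySem.Int.mod_eq_emod_of_pos (by norm_num)]
    rcases Nat.even_or_odd (divs num.toNat).card with ⟨m, hm⟩ | ho
    · omega
    · exact absurd ho heven
  unfold bodyA
  rw [if_pos hmod]

-- ---- B-side loop lemmas ----

lemma sqLoopB_lt : ∀ (left right k acc : Int), right < left → sqLoopB left right k acc = acc := by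
  intro left right k acc
  induction k, acc using sqLoopB.induct (left := left) (right := right) with
  | case1 k acc hcond ih =>
    intro h
    have hnotle : ¬ left ≤ k * k := by omega
    simp only [dite_eq_ite] at ih
    rw [sqLoopB, dif_pos hcond, if_neg hnotle]
    rw [if_neg hnotle] at ih
    exact ih h
  | case2 k acc hcond =>
    intro _
    rw [sqLoopB, dif_neg hcond]

lemma sqLoopB_peel_sq : ∀ (left right k acc : Int), 1 ≤ k → (∃ j : Int, k ≤ j ∧ j * j = right) →
    sqLoopB left right k acc
      = sqLoopB left (right - 1) k acc + (if left ≤ right then right else 0) := by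
  intro left right k acc
  induction k, acc using sqLoopB.induct (left := left) (right := right) with
  | case1 k acc hcond ih =>
    rintro hk ⟨j, hjk, hjj⟩
    by_cases heq : k * k = right
    · have hexp : (k + 1) * (k + 1) = k * k + 2 * k + 1 := by ring
      have hstop : ¬ (k + 1) * (k + 1) ≤ right := by omega
      have e1 : sqLoopB left right k acc
          = sqLoopB left right (k + 1) (if left ≤ k * k then acc + k * k else acc) := by
        rw [sqLoopB, dif_pos hcond]
      have e2 : sqLoopB left right (k + 1) (if left ≤ k * k then acc + k * k else acc)
          = (if left ≤ k * k then acc + k * k else acc) := by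
        rw [sqLoopB, dif_neg hstop]
      have e3 : sqLoopB left (right - 1) k acc = acc := by
        rw [sqLoopB, dif_neg (by omega : ¬ k * k ≤ right - 1)]
      rw [e1, e2, e3, heq]
      split_ifs <;> ring
    · have hlt : k * k < right := lt_of_le_of_ne hcond heq
      have hcond' : k * k ≤ right - 1 := by omega
      have hj' : ∃ j : Int, k + 1 ≤ j ∧ j * j = right := by
        refine ⟨j, ?_, hjj⟩
        rcases eq_or_lt_of_le hjk with rfl | h
        · exact absurd hjj heq
        · omega
      have e1 : sqLoopB left right k acc
          = sqLoopB left right (k + 1) (if left ≤ k * k then acc + k * k else acc) := by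
        rw [sqLoopB, dif_pos hcond]
      have e3 : sqLoopB left (right - 1) k acc
          = sqLoopB left (right - 1) (k + 1) (if left ≤ k * k then acc + k * k else acc) := by
        rw [sqLoopB, dif_pos hcond']
      rw [e1, e3]
      simp only [dite_eq_ite] at ih
      exact ih (by omega) hj'
  | case2 k acc hcond =>
    rintro hk ⟨j, hjk, hjj⟩
    have hkj : k * k ≤ j * j := mul_le_mul hjk hjk (by omega) (by omega)
    omega

lemma sqLoopB_peel_nonsq : ∀ (left right k acc : Int), 1 ≤ k → ¬ (∃ j : Int, k ≤ j ∧ j * j = right) →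
    sqLoopB left right k acc = sqLoopB left (right - 1) k acc := by
  intro left right k acc
  induction k, acc using sqLoopB.induct (left := left) (right := right) with
  | case1 k acc hcond ih =>
    intro hk hns
    have heq : k * k ≠ right := fun h => hns ⟨k, le_refl k, h⟩
    have hcond' : k * k ≤ right - 1 := by omega
    have hns' : ¬ ∃ j : Int, k + 1 ≤ j ∧ j * j = right := by
      rintro ⟨j, hjk, hjj⟩
      exact hns ⟨j, by omega, hjj⟩
    have e1 : sqLoopB left right k acc
        = sqLoopB left right (k + 1) (if left ≤ k * k then acc + k * k else acc) := by
      rw [sqLoopB, dif_pos hcond]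
    have e3 : sqLoopB left (right - 1) k acc
        = sqLoopB left (right - 1) (k + 1) (if left ≤ k * k then acc + k * k else acc) := by
      rw [sqLoopB, dif_pos hcond']
    rw [e1, e3]
    simp only [dite_eq_ite] at ih
    exact ih (by omega) hns'
  | case2 k acc hcond =>
    intro _ _
    rw [sqLoopB, dif_neg hcond, sqLoopB, dif_neg (by omega : ¬ k * k ≤ right - 1)]

lemma even_prod (a b : Int) : ∃ s : Int, (a + b) * (b - a + 1) = 2 * s := by
  rcases Int.even_or_odd (a + b) with ⟨t, ht⟩ | ⟨t, ht⟩
  · exact ⟨t * (b - a + 1), by rw [ht]; ring⟩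
  · exact ⟨(a + b) * (t + 1 - a), by linear_combination (a + b) * ht⟩

lemma floordiv_even (s : Int) : PySem.Int.floordiv (2 * s) 2 = s := by
  rw [PySem.Int.floordiv_eq_ediv_of_pos (by norm_num)]
  omega

lemma total_succ (a b : Int) :
    PySem.Int.floordiv ((a + b) * (b - a + 1)) 2
      = PySem.Int.floordiv ((a + (b - 1)) * ((b - 1) - a + 1)) 2 + b := by
  obtain ⟨s, hs⟩ := even_prod a b
  obtain ⟨t, ht⟩ := even_prod a (b - 1)
  rw [hs, ht, floordiv_even, floordiv_even]
  have h2 : 2 * s - 2 * t = 2 * b := by linear_combination ht - hs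
  omega

lemma alt_eval (left right : Int) (h : left ≤ right + 1) :
    solution_alt left right
      = PySem.Int.floordiv ((left + right) * (right - left + 1)) 2
        - 2 * sqLoopB left right 1 0 := by
  unfold solution_alt
  by_cases hlr : left > right
  · have h1 : right - left + 1 = 0 := by omega
    rw [if_pos hlr, h1, sqLoopB_lt _ _ _ _ (by omega)]
    norm_num
  · rw [if_neg hlr]

lemma main_sum_aux (left : Int) (h1 : 1 ≤ left) :
    ∀ (m : ℕ) (right : Int), (right + 1 - left).toNat = m →
      ((PySem.List.pyRange left (right + 1) 1).map bodyA).sum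
      = solution_alt left right := by
  intro m
  induction m with
  | zero =>
    intro right hm
    have hrl : right < left := by omega
    rw [PySem.List.pyRange_one_eq_nil (by omega)]
    simp [solution_alt, hrl]
  | succ m ih =>
    intro right hm
    have hlr : left ≤ right := by omega
    rw [PySem.List.pyRange_one_succ_right (by omega : left ≤ right),
      List.map_append, List.sum_append]
    have ihr := ih (right - 1) (by omega)
    rw [show right - 1 + 1 = right from by ring] at ihr
    rw [ihr]
    simp only [List.map_cons, List.map_nil, List.sum_cons, List.sum_nil, add_zero]
    rw [alt_eval _ _ (by omega), alt_eval _ _ (by omega), total_succ left right]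
    by_cases hsq : ∃ j : Int, 1 ≤ j ∧ j * j = right
    · rw [sqLoopB_peel_sq _ _ _ _ (le_refl 1) hsq, if_pos hlr,
        bodyA_sq right (by omega) hsq]
      ring_nf
    · rw [sqLoopB_peel_nonsq _ _ _ _ (le_refl 1) hsq,
        bodyA_nonsq right (by omega) hsq]
      rw [show right - 1 - left + 1 = right - left from by ring]
      ring

lemma main_sum (left : Int) (h1 : 1 ≤ left) (right : Int) :
    ((PySem.List.pyRange left (right + 1) 1).map bodyA).sum = solution_alt left right :=
  main_sum_aux left h1 _ right rfl

-- ===== VERDICT (by name: the statement is the Claim_ definition above) =====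
theorem solution_spec : Claim_equal_solution := by
  intro left right _ hpre
  unfold Spec_solution
  rcases hpre with h1 | h2
  · rw [sol_sum left right h1, main_sum left h1 right]
  · -- empty range: both are 0
    unfold solution
    rw [PySem.List.pyRange_one_eq_nil (by omega)]
    simp [solution_alt, h2]
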